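-- pv_equiv track=rewrite | github.com/zhouchanghai/problem_ans | codility/2014Magnesium.py | solution
-- ===== SOURCE A (Python) =====
-- def solution(N,A,B,C):
--     if not A:
--         return 0
--     dist = list(zip(C,A,B))
--     dist.sort()
--     # dp[i] is the longest path ends at i
--     dp = [0]*N
--     curDist = dist[0][0]
--     update = {}
--     for i, t in enumerate(dist):
--         d, a, b = t
--         if d != curDist:
--             for node, path in update.items():
--                 dp[node] = path
--             curDist = d
--             update.clear()
--         # a -> b
--         update[b] = max(update.get(b, dp[b]), dp[a] + 1)
--         # b -> a
--         update[a] = max(update.get(a, dp[a]), dp[b] + 1)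
--
--     for node, path in update.items():
--         dp[node] = path
--     return max(dp)
-- ===== SOURCE B (Python) =====
-- def solution(N, A, B, C):
--     m = min(len(A), len(B), len(C))
--     if m == 0:
--         return 0
--     # per-node log of (weight, path-length ending here); queries filter on strictly smaller weight
--     hist = [[] for _ in range(N)]
--     for w, a, b in sorted(zip(C, A, B)):
--         va = 1 + max((v for x, v in hist[b] if x < w), default=0)
--         vb = 1 + max((v for x, v in hist[a] if x < w), default=0)
--         hist[a].append((w, va))
--         hist[b].append((w, vb))
--     return max(max((v for _, v in h), default=0) for h in hist)
-- ===== Notes on version B (the rewrite author's own statement) =====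
-- stated objective: alternative
-- what changed: Replaces A's node-indexed dp with per-weight-group batching (running-max dict, change-detection flush, trailing flush) by a per-edge streaming scheme: each node keeps a log of (weight, path-length) entries, each sorted edge queries both endpoint logs filtered to strictly smaller weights and appends the two new entries, so equal-weight edges need no grouping or flush at all.
-- outside the precondition, e.g. on solution(2, [-1, -1, -2], [1, -2, -2], [2, 2, 1]): A returns 1, B returns 2; on solution(4, [0, 0, -1, 2], [1, 1, 0, 3], [1, 2, 3, 3]): A returns 2, B returns 3
import Mathlib
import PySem

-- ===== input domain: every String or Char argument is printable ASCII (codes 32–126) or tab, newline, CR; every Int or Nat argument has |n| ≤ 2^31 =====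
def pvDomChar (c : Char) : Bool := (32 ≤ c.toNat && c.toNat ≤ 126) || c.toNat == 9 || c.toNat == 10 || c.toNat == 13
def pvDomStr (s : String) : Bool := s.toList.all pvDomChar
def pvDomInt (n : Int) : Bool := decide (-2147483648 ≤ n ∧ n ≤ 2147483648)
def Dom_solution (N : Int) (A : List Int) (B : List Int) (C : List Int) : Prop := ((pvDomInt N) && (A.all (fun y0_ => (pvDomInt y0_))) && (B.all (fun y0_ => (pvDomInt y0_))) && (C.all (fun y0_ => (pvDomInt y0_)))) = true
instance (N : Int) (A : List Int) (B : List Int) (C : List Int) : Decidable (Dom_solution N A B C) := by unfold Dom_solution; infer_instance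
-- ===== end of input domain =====

-- B replaces A's per-node dp with weight-group batching (running-max dict + change-detection
-- flush) by per-node logs of (weight, path-length) entries queried with a strict weight filter,
-- processing one sorted edge at a time with no grouping; return value only.

-- Shared helper: Python sorts the (c, a, b) tuples lexicographically.  The key encodes the triple
-- into one Int, order-isomorphic to the lexicographic triple order on the Dom range |x| ≤ 2^31
-- (base 2^33 exceeds the component range), so `sorted` with this key is exact on Dom.
def encKey (e : Int × Int × Int) : Int :=
  ((e.1 + 2 ^ 31) * 2 ^ 33 + (e.2.1 + 2 ^ 31)) * 2 ^ 33 + (e.2.2 + 2 ^ 31)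

-- list(zip(C, A, B)) then .sort() / sorted(...)
def sortEdges (C A B : List Int) : List (Int × Int × Int) :=
  PySem.List.sorted (C.zip (A.zip B)) encKey false

-- max(l) for a nonempty l (Python raises on []; Pre_ rules that out)
def pyMax (l : List Int) : Int :=
  match l with
  | [] => 0
  | x :: t => t.foldl max x

-- ===== PORT A =====
-- the flush: for node, path in update.items(): dp[node] = path
def flushA (u : PySem.Dict Int Int) (dp : List Int) : List Int :=
  u.items.foldl (fun dp p => PySem.List.pySetD dp p.1 p.2) dp

-- one iteration of A's main loop; state (dp, curDist, update)
def stepA (st : List Int × Int × PySem.Dict Int Int) (e : Int × Int × Int) :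
    List Int × Int × PySem.Dict Int Int :=
  let dp := st.1; let cur := st.2.1; let u := st.2.2
  let d := e.1; let a := e.2.1; let b := e.2.2
  let dp' := if d ≠ cur then flushA u dp else dp
  let cur' := if d ≠ cur then d else cur
  let u' := if d ≠ cur then PySem.Dict.empty else u
  let u1 := u'.insert b (max (u'.getD b (PySem.List.pyGetD dp' b 0)) (PySem.List.pyGetD dp' a 0 + 1))
  let u2 := u1.insert a (max (u1.getD a (PySem.List.pyGetD dp' a 0)) (PySem.List.pyGetD dp' b 0 + 1))
  (dp', cur', u2)

def solution (N : Int) (A : List Int) (B : List Int) (C : List Int) : Int :=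
  if A = [] then 0
  else
    let dist := sortEdges C A B
    let dp0 : List Int := List.replicate N.toNat 0            -- [0]*N
    let cur0 := (dist.headD (0, 0, 0)).1                      -- dist[0][0]; dist ≠ [] under Pre_
    let st := dist.foldl stepA (dp0, cur0, PySem.Dict.empty)
    pyMax (flushA st.2.2 st.1)

-- ===== PORT B =====
-- max((v for x, v in h if x < w), default=0)
def queryB (h : List (Int × Int)) (w : Int) : Int :=
  PySem.List.maxD ((h.filter (fun p => decide (p.1 < w))).map Prod.snd) (fun v => v) 0

-- max((v for _, v in h), default=0)
def nodeBest (h : List (Int × Int)) : Int :=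
  PySem.List.maxD (h.map Prod.snd) (fun v => v) 0

-- one iteration of B's loop: query both endpoint logs on the pre-edge state, then append
def stepB (hist : List (List (Int × Int))) (e : Int × Int × Int) : List (List (Int × Int)) :=
  let w := e.1; let a := e.2.1; let b := e.2.2
  let va := 1 + queryB (PySem.List.pyGetD hist b []) w
  let vb := 1 + queryB (PySem.List.pyGetD hist a []) w
  let h1 := PySem.List.pySetD hist a (PySem.List.pyGetD hist a [] ++ [(w, va)])
  PySem.List.pySetD h1 b (PySem.List.pyGetD h1 b [] ++ [(w, vb)])

def solution_alt (N : Int) (A : List Int) (B : List Int) (C : List Int) : Int :=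
  let m := min (min (PySem.List.len A) (PySem.List.len B)) (PySem.List.len C)
  if m = 0 then 0
  else
    let hist0 : List (List (Int × Int)) := List.replicate N.toNat []   -- [[] for _ in range(N)]
    let hist := (sortEdges C A B).foldl stepB hist0
    pyMax (hist.map nodeBest)

-- ===== PRECONDITION & SPEC =====
-- Pre_ excludes (a) the inputs where A raises IndexError (A nonempty with an empty zip, or an
-- endpoint outside [-N, N)), and (b) inputs in which two DISTINCT endpoint labels denote the
-- same node cell mod N (such as -1 and N-1): there A returns an accidental, dict-order-dependent
-- value, because its per-weight batch dict is keyed by the raw label while dp wraps indices, so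
-- aliased labels overwrite each other in dict insertion order.
def Pre_solution (N : Int) (A : List Int) (B : List Int) (C : List Int) : Prop :=
  A = [] ∨
    (C.zip (A.zip B) ≠ [] ∧
      (∀ e ∈ C.zip (A.zip B), (-N ≤ e.2.1 ∧ e.2.1 < N) ∧ (-N ≤ e.2.2 ∧ e.2.2 < N)) ∧
      (∀ x ∈ (C.zip (A.zip B)).flatMap (fun e => [e.2.1, e.2.2]),
        ∀ y ∈ (C.zip (A.zip B)).flatMap (fun e => [e.2.1, e.2.2]), x ≠ y → x % N ≠ y % N))
instance (N : Int) (A : List Int) (B : List Int) (C : List Int) : Decidable (Pre_solution N A B C) := by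
  unfold Pre_solution; infer_instance

def pvWitness_solution : Int × List Int × List Int × List Int := (2, [0], [1], [5])

def Spec_solution (N : Int) (A : List Int) (B : List Int) (C : List Int) (out : Int) : Prop := out = solution_alt N A B C
instance (N : Int) (A : List Int) (B : List Int) (C : List Int) (out : Int) : Decidable (Spec_solution N A B C out) := by unfold Spec_solution; infer_instance

-- ===== CLAIM (what is proved, stated in full; the proofs are below) =====
def Claim_equal_solution : Prop := ∀ (N : Int) (A : List Int) (B : List Int) (C : List Int), Dom_solution N A B C → Pre_solution N A B C → Spec_solution N A B C (solution N A B C)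

-- ===== LEMMAS AND PROOFS =====

-- the dp cell a Python index k denotes: k % n (wrap-around for negative labels)
def cellN (k : Int) (n : Nat) : Nat := (k % (n : Int)).toNat

-- an admissible label set: in range, and mapping injectively onto dp cells
def GoodP (P : Int → Prop) (n : Nat) : Prop :=
  (∀ k, P k → -(n : Int) ≤ k ∧ k < (n : Int)) ∧
  (∀ k l, P k → P l → cellN k n = cellN l n → k = l)

-- the invariant tying A's loop state (dp, cur, update-dict keyed by raw labels) to B's
-- per-cell logs: dp holds the pre-group value, the dict entries are the full-log maxima of
-- their label's cell, cells without a dict key are untouched in the current group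
def InvAB (P : Int → Prop) (n : Nat) (dp : List Int) (cur : Int) (u : PySem.Dict Int Int)
    (hist : List (List (Int × Int))) : Prop :=
  dp.length = n ∧ hist.length = n ∧ u.keys.Nodup ∧
  (∀ k ∈ u.keys, P k) ∧
  (∀ x : Nat, x < n → ∀ p ∈ hist.getD x [], p.1 ≤ cur ∧ 0 ≤ p.2) ∧
  (∀ x : Nat, x < n → dp.getD x 0 = queryB (hist.getD x []) cur) ∧
  (∀ x : Nat, x < n → (∀ k ∈ u.keys, cellN k n ≠ x) → dp.getD x 0 = nodeBest (hist.getD x [])) ∧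
  (∀ p ∈ u.items, p.2 = nodeBest (hist.getD (cellN p.1 n) []))

theorem max?_id_append_singleton (l : List Int) (v : Int) :
    PySem.List.max? (l ++ [v]) (fun x => x) =
      some ((PySem.List.max? l (fun x => x)).elim v (fun m => max m v)) := by
  cases l with
  | nil => rfl
  | cons x t =>
    rw [List.cons_append, PySem.List.max?_id_cons, PySem.List.max?_id_cons,
      List.foldl_append]
    simp [Option.elim]

theorem maxD_id_append_singleton (l : List Int) (v d : Int) (hdv : d ≤ v) :
    PySem.List.maxD (l ++ [v]) (fun x => x) d =
      max (PySem.List.maxD l (fun x => x) d) v := by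
  unfold PySem.List.maxD
  rw [max?_id_append_singleton]
  cases h : PySem.List.max? l (fun x => x) with
  | none => simp [Option.elim]; omega
  | some m => simp [Option.elim]

theorem maxD_id_nonneg (l : List Int) (h : ∀ x ∈ l, 0 ≤ x) :
    0 ≤ PySem.List.maxD l (fun x => x) 0 := by
  unfold PySem.List.maxD
  cases hm : PySem.List.max? l (fun x => x) with
  | none => simp
  | some m => exact (Option.getD_some (a := m) (b := 0)) ▸ h m (PySem.List.max?_mem hm)

theorem queryB_nonneg (h : List (Int × Int)) (w : Int) (hv : ∀ p ∈ h, 0 ≤ p.2) :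
    0 ≤ queryB h w := by
  apply maxD_id_nonneg
  intro x hx
  obtain ⟨p, hp, rfl⟩ := List.mem_map.mp hx
  exact hv p (List.mem_of_mem_filter hp)

theorem queryB_append_not_lt (h : List (Int × Int)) (w' v w : Int) (hw : ¬ w' < w) :
    queryB (h ++ [(w', v)]) w = queryB h w := by
  unfold queryB
  rw [List.filter_append]
  simp [hw]

theorem queryB_eq_nodeBest (h : List (Int × Int)) (w : Int) (hall : ∀ p ∈ h, p.1 < w) :
    queryB h w = nodeBest h := by
  unfold queryB nodeBest
  rw [List.filter_eq_self.mpr (fun p hp => by simpa using hall p hp)]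

theorem nodeBest_append (h : List (Int × Int)) (w v : Int) (hv : 0 ≤ v) :
    nodeBest (h ++ [(w, v)]) = max (nodeBest h) v := by
  unfold nodeBest
  rw [List.map_append]
  exact maxD_id_append_singleton _ v 0 hv

-- indexing bridges: Python's wrap-around index IS the cell
theorem emod_inrange (k n : Int) (hn : 0 < n) (h0 : -n ≤ k) (h1 : k < n) :
    k % n = if 0 ≤ k then k else k + n := by
  split_ifs with h
  · exact Int.emod_eq_of_lt h h1
  · have hs : (k + n * 1) % n = k % n := Int.add_mul_emod_self_left k n 1
    rw [mul_one] at hs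
    rw [← hs, Int.emod_eq_of_lt (by omega) (by omega)]

theorem cellN_lt (k : Int) (n : Nat) (hn : 0 < n) : cellN k n < n := by
  unfold cellN
  have h1 := Int.emod_nonneg k (show (n : Int) ≠ 0 by omega)
  have h2 := Int.emod_lt_of_pos k (show (0 : Int) < n by omega)
  omega

theorem pyIdx?_wrap (n : Nat) (i : Int) (h0 : -(n : Int) ≤ i) (h1 : i < (n : Int)) :
    PySem.List.pyIdx? n i = some (cellN i n) := by
  have hn : 0 < n := by omega
  have hmod := emod_inrange i (n : Int) (by omega) h0 h1
  unfold PySem.List.pyIdx? cellN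
  by_cases ha : 0 ≤ i
  · rw [if_pos ha] at hmod
    rw [if_pos ha, if_pos h1]
    exact congrArg some (by omega)
  · rw [if_neg ha] at hmod
    rw [if_neg ha, if_pos h0]
    exact congrArg some (by omega)

theorem pyGetD_wrap {α : Type} (xs : List α) (i : Int) (d : α)
    (h0 : -(xs.length : Int) ≤ i) (h1 : i < (xs.length : Int)) :
    PySem.List.pyGetD xs i d = xs.getD (cellN i xs.length) d := by
  unfold PySem.List.pyGetD PySem.List.pyGet?
  rw [pyIdx?_wrap _ _ h0 h1]
  simp [List.getD]

theorem getD_pySetD_wrap {α : Type} (xs : List α) (i : Int) (v d : α) (x : Nat)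
    (h0 : -(xs.length : Int) ≤ i) (h1 : i < (xs.length : Int)) (hx : x < xs.length) :
    (PySem.List.pySetD xs i v).getD x d =
      if x = cellN i xs.length then v else xs.getD x d := by
  unfold PySem.List.pySetD PySem.List.pySet?
  rw [pyIdx?_wrap _ _ h0 h1]
  simp only [Option.map_some, Option.getD_some]
  rw [List.getD_eq_getElem _ _ (by simpa using hx), List.getElem_set,
    List.getD_eq_getElem xs d hx]
  by_cases h : x = cellN i xs.length
  · rw [if_pos (by omega), if_pos h]
  · rw [if_neg (by omega), if_neg h]

-- the flush fold, at list level: with cell-distinct in-range keys it is a pointwise write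
theorem foldl_pySetD_getD (l : List (Int × Int)) (dp : List Int) (x : Nat)
    (hx : x < dp.length) (hnd : (l.map (fun p => cellN p.1 dp.length)).Nodup)
    (hr : ∀ p ∈ l, -(dp.length : Int) ≤ p.1 ∧ p.1 < (dp.length : Int)) :
    (l.foldl (fun d p => PySem.List.pySetD d p.1 p.2) dp).getD x 0 =
      ((l.find? (fun p => cellN p.1 dp.length == x)).map Prod.snd).getD (dp.getD x 0) := by
  induction l generalizing dp with
  | nil => simp
  | cons p t ih =>
    obtain ⟨hp0, hp1⟩ := hr p List.mem_cons_self
    have hlen : (PySem.List.pySetD dp p.1 p.2).length = dp.length :=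
      PySem.List.length_pySetD dp p.1 p.2
    rw [List.foldl_cons, List.find?_cons]
    by_cases hpx : cellN p.1 dp.length = x
    · -- head writes cell x; Nodup means the tail never touches it again
      have htail : ∀ q ∈ t, ¬ (cellN q.1 dp.length == x) = true := by
        intro q hq hbeq
        have : cellN p.1 dp.length ∈ t.map (fun q => cellN q.1 dp.length) := by
          rw [hpx, ← (by simpa using hbeq : cellN q.1 dp.length = x)]
          exact List.mem_map.mpr ⟨q, hq, rfl⟩
        exact (List.nodup_cons.mp (by simpa using hnd)).1 this
      have hfind : t.find? (fun q => cellN q.1 dp.length == x) = none :=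
        List.find?_eq_none.mpr htail
      rw [ih (PySem.List.pySetD dp p.1 p.2) (by omega)
            (by rw [hlen]; exact (List.nodup_cons.mp (by simpa using hnd)).2)
            (fun q hq => by rw [hlen]; exact hr q (List.mem_cons_of_mem _ hq)),
          hlen, hfind]
      rw [show (cellN p.1 dp.length == x) = true from by simpa using hpx]
      rw [getD_pySetD_wrap dp p.1 p.2 0 x hp0 hp1 hx]
      rw [if_pos hpx.symm]
      simp
    · rw [show (cellN p.1 dp.length == x) = false from by simpa using hpx]
      rw [ih (PySem.List.pySetD dp p.1 p.2) (by omega)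
            (by rw [hlen]; exact (List.nodup_cons.mp (by simpa using hnd)).2)
            (fun q hq => by rw [hlen]; exact hr q (List.mem_cons_of_mem _ hq)), hlen]
      rw [getD_pySetD_wrap dp p.1 p.2 0 x hp0 hp1 hx]
      rw [if_neg (fun hh => hpx hh.symm)]

theorem length_foldl_pySetD (l : List (Int × Int)) (dp : List Int) :
    (l.foldl (fun d p => PySem.List.pySetD d p.1 p.2) dp).length = dp.length := by
  induction l generalizing dp with
  | nil => rfl
  | cons p t ih => simp [List.foldl_cons, ih, PySem.List.length_pySetD]

theorem length_flushA (u : PySem.Dict Int Int) (dp : List Int) :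
    (flushA u dp).length = dp.length := length_foldl_pySetD u.items dp

-- a dict lookup with the label's dp value as default always yields the cell's full-log maximum
theorem dict_lookup (P : Int → Prop) (n : Nat) (dp : List Int) (cur : Int)
    (u : PySem.Dict Int Int) (hist : List (List (Int × Int)))
    (hG : GoodP P n) (hI : InvAB P n dp cur u hist) (b : Int) (hPb : P b) :
    u.getD b (dp.getD (cellN b n) 0) = nodeBest (hist.getD (cellN b n) []) := by
  obtain ⟨hdl, hhl, hnd, hPk, hWV, h2, hU0, hUk⟩ := hI
  have hn : 0 < n := by
    have := hG.1 b hPb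
    omega
  rw [PySem.Dict.getD_eq_get?_getD]
  cases hq : u.get? b with
  | some v =>
    have hmem := PySem.Dict.mem_items_of_get?_eq_some u hq
    simpa using hUk (b, v) hmem
  | none =>
    simp only [Option.getD_none]
    apply hU0 _ (cellN_lt b n hn)
    intro k hk hcell
    have hkb : k = b := hG.2 k b (hPk k hk) hPb hcell
    subst hkb
    have : u.contains k = false := (PySem.Dict.get?_eq_none_iff_contains u k).mp hq
    rw [PySem.Dict.contains_eq_decide_mem_keys] at this
    simp [hk] at this

theorem flushA_nodeBest (P : Int → Prop) (n : Nat) (dp : List Int) (cur : Int)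
    (u : PySem.Dict Int Int) (hist : List (List (Int × Int)))
    (hG : GoodP P n) (hI : InvAB P n dp cur u hist) :
    ∀ x : Nat, x < n → (flushA u dp).getD x 0 = nodeBest (hist.getD x []) := by
  obtain ⟨hdl, hhl, hnd, hPk, hWV, h2, hU0, hUk⟩ := hI
  intro x hx
  have hcnd : (u.items.map (fun p => cellN p.1 dp.length)).Nodup := by
    have heq : u.items.map (fun p => cellN p.1 dp.length)
        = u.keys.map (fun k => cellN k dp.length) := by
      simp [PySem.Dict.keys, List.map_map]
    rw [heq]
    refine List.Nodup.map_on ?_ hnd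
    intro k hk l hl hkl
    exact hG.2 k l (hPk k hk) (hPk l hl) (by rwa [hdl] at hkl)
  have hrng : ∀ p ∈ u.items, -(dp.length : Int) ≤ p.1 ∧ p.1 < (dp.length : Int) := by
    intro p hp
    have := hG.1 p.1 (hPk p.1 (PySem.Dict.mem_keys_of_mem_items u hp))
    omega
  unfold flushA
  rw [foldl_pySetD_getD u.items dp x (by omega) hcnd hrng]
  cases hf : u.items.find? (fun p => cellN p.1 dp.length == x) with
  | none =>
    simp only [Option.map_none, Option.getD_none]
    apply hU0 x hx
    intro k hk hcell
    obtain ⟨p, hp, hpk⟩ := List.mem_map.mp (show k ∈ u.items.map Prod.fst from hk)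
    have := List.find?_eq_none.mp hf p hp
    rw [hpk] at this
    rw [hdl] at this
    simp [hcell] at this
  | some p =>
    have hp := List.mem_of_find?_eq_some hf
    have hc : cellN p.1 n = x := by
      have := List.find?_some hf
      rw [hdl] at this
      simpa using this
    simp only [Option.map_some, Option.getD_some]
    rw [hUk p hp, hc]

-- boundary: flushing and opening a new (strictly larger) weight re-establishes the invariant
theorem inv_flush (P : Int → Prop) (n : Nat) (dp : List Int) (cur : Int)
    (u : PySem.Dict Int Int) (hist : List (List (Int × Int))) (d : Int)
    (hG : GoodP P n) (hI : InvAB P n dp cur u hist) (hd : cur < d) :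
    InvAB P n (flushA u dp) d PySem.Dict.empty hist := by
  have hget := flushA_nodeBest P n dp cur u hist hG hI
  obtain ⟨hdl, hhl, hnd, hPk, hWV, h2, hU0, hUk⟩ := hI
  refine ⟨by rw [length_flushA, hdl], hhl, PySem.Dict.nodup_keys_empty,
    by simp [PySem.Dict.keys_empty], ?_, ?_, ?_, ?_⟩
  · intro x hx p hp
    have := hWV x hx p hp
    exact ⟨by omega, this.2⟩
  · intro x hx
    rw [hget x hx, queryB_eq_nodeBest]
    intro p hp
    have := hWV x hx p hp
    omega
  · intro x hx _
    exact hget x hx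
  · intro p hp
    simp [PySem.Dict.empty] at hp

-- a same-weight edge: A leaves dp and cur, updates the dict; B appends to the two cell logs
theorem inv_step (P : Int → Prop) (n : Nat) (dp : List Int) (cur : Int)
    (u : PySem.Dict Int Int) (hist : List (List (Int × Int))) (e : Int × Int × Int)
    (hG : GoodP P n) (hI : InvAB P n dp cur u hist) (hw : e.1 = cur)
    (hPa : P e.2.1) (hPb : P e.2.2) :
    stepA (dp, cur, u) e = (dp, cur, (stepA (dp, cur, u) e).2.2) ∧
      InvAB P n dp cur (stepA (dp, cur, u) e).2.2 (stepB hist e) := by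
  have hIc := hI
  obtain ⟨hdl, hhl, hnd, hPk, hWV, h2, hU0, hUk⟩ := hI
  obtain ⟨ha0, ha1⟩ := hG.1 e.2.1 hPa
  obtain ⟨hb0, hb1⟩ := hG.1 e.2.2 hPb
  have hn : 0 < n := by omega
  have haN : cellN e.2.1 n < n := cellN_lt _ _ hn
  have hbN : cellN e.2.2 n < n := cellN_lt _ _ hn
  have hrA : PySem.List.pyGetD dp e.2.1 0 = dp.getD (cellN e.2.1 n) 0 := by
    rw [pyGetD_wrap dp e.2.1 0 (by omega) (by omega), hdl]
  have hrB : PySem.List.pyGetD dp e.2.2 0 = dp.getD (cellN e.2.2 n) 0 := by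
    rw [pyGetD_wrap dp e.2.2 0 (by omega) (by omega), hdl]
  have hhA : PySem.List.pyGetD hist e.2.1 [] = hist.getD (cellN e.2.1 n) [] := by
    rw [pyGetD_wrap hist e.2.1 [] (by omega) (by omega), hhl]
  have hhB : PySem.List.pyGetD hist e.2.2 [] = hist.getD (cellN e.2.2 n) [] := by
    rw [pyGetD_wrap hist e.2.2 [] (by omega) (by omega), hhl]
  -- appended values and their facts
  have hVAval : 1 + queryB (hist.getD (cellN e.2.2 n) []) e.1 = dp.getD (cellN e.2.2 n) 0 + 1 := by
    rw [hw, ← h2 _ hbN]; omega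
  have hVBval : 1 + queryB (hist.getD (cellN e.2.1 n) []) e.1 = dp.getD (cellN e.2.1 n) 0 + 1 := by
    rw [hw, ← h2 _ haN]; omega
  have hVAnn : 0 ≤ 1 + queryB (hist.getD (cellN e.2.2 n) []) e.1 := by
    have := queryB_nonneg (hist.getD (cellN e.2.2 n) []) e.1 (fun p hp => (hWV _ hbN p hp).2)
    omega
  have hVBnn : 0 ≤ 1 + queryB (hist.getD (cellN e.2.1 n) []) e.1 := by
    have := queryB_nonneg (hist.getD (cellN e.2.1 n) []) e.1 (fun p hp => (hWV _ haN p hp).2)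
    omega
  -- A's dict after the edge
  have hu2 : (stepA (dp, cur, u) e).2.2 =
      (u.insert e.2.2 (max (u.getD e.2.2 (dp.getD (cellN e.2.2 n) 0)) (dp.getD (cellN e.2.1 n) 0 + 1))).insert e.2.1
        (max ((u.insert e.2.2 (max (u.getD e.2.2 (dp.getD (cellN e.2.2 n) 0)) (dp.getD (cellN e.2.1 n) 0 + 1))).getD e.2.1
          (dp.getD (cellN e.2.1 n) 0)) (dp.getD (cellN e.2.2 n) 0 + 1)) := by
    simp [stepA, hw, hrA, hrB]
  -- B's logs after the edge
  have hist1len : (PySem.List.pySetD hist e.2.1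
      (hist.getD (cellN e.2.1 n) [] ++ [(e.1, 1 + queryB (hist.getD (cellN e.2.2 n) []) e.1)])).length = n := by
    rw [PySem.List.length_pySetD, hhl]
  have hstepB : stepB hist e = PySem.List.pySetD
      (PySem.List.pySetD hist e.2.1
        (hist.getD (cellN e.2.1 n) [] ++ [(e.1, 1 + queryB (hist.getD (cellN e.2.2 n) []) e.1)]))
      e.2.2
      ((PySem.List.pySetD hist e.2.1
        (hist.getD (cellN e.2.1 n) [] ++ [(e.1, 1 + queryB (hist.getD (cellN e.2.2 n) []) e.1)])).getD (cellN e.2.2 n) []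
        ++ [(e.1, 1 + queryB (hist.getD (cellN e.2.1 n) []) e.1)]) := by
    simp only [stepB, hhA, hhB]
    rw [pyGetD_wrap _ e.2.2 [] (by rw [hist1len]; omega) (by rw [hist1len]; omega), hist1len]
  have hg1 : ∀ x : Nat, x < n →
      (PySem.List.pySetD hist e.2.1
        (hist.getD (cellN e.2.1 n) [] ++ [(e.1, 1 + queryB (hist.getD (cellN e.2.2 n) []) e.1)])).getD x [] =
      if x = cellN e.2.1 n
        then hist.getD (cellN e.2.1 n) [] ++ [(e.1, 1 + queryB (hist.getD (cellN e.2.2 n) []) e.1)]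
        else hist.getD x [] := by
    intro x hx
    rw [getD_pySetD_wrap hist e.2.1 _ [] x (by omega) (by omega) (by omega), hhl]
  have hg2 : ∀ x : Nat, x < n → (stepB hist e).getD x [] =
      if x = cellN e.2.2 n
        then (PySem.List.pySetD hist e.2.1
            (hist.getD (cellN e.2.1 n) [] ++ [(e.1, 1 + queryB (hist.getD (cellN e.2.2 n) []) e.1)])).getD (cellN e.2.2 n) []
          ++ [(e.1, 1 + queryB (hist.getD (cellN e.2.1 n) []) e.1)]
        else (PySem.List.pySetD hist e.2.1
            (hist.getD (cellN e.2.1 n) [] ++ [(e.1, 1 + queryB (hist.getD (cellN e.2.2 n) []) e.1)])).getD x [] := by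
    intro x hx
    rw [hstepB]
    rw [getD_pySetD_wrap _ e.2.2 _ [] x (by rw [hist1len]; omega) (by rw [hist1len]; omega)
      (by rw [hist1len]; omega), hist1len]
  refine ⟨by simp [stepA, hw], ?_, ?_, ?_, ?_, ?_, ?_, ?_, ?_⟩
  · exact hdl
  · simp [stepB, PySem.List.length_pySetD, hhl]
  · rw [hu2]
    exact PySem.Dict.nodup_keys_insert _ _ _ (PySem.Dict.nodup_keys_insert _ _ _ hnd)
  · rw [hu2]
    intro k hk
    rcases (PySem.Dict.mem_keys_insert _ _ _ _).mp hk with rfl | hk'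
    · exact hPa
    · rcases (PySem.Dict.mem_keys_insert _ _ _ _).mp hk' with rfl | hk''
      · exact hPb
      · exact hPk k hk''
  · -- weights bounded by cur, values nonnegative
    intro x hx p hp
    rw [hg2 x hx] at hp
    have hnew2 : p = (e.1, 1 + queryB (hist.getD (cellN e.2.1 n) []) e.1) →
        p.1 ≤ cur ∧ 0 ≤ p.2 := by rintro rfl; exact ⟨le_of_eq hw, hVBnn⟩
    have hnew1 : p = (e.1, 1 + queryB (hist.getD (cellN e.2.2 n) []) e.1) →
        p.1 ≤ cur ∧ 0 ≤ p.2 := by rintro rfl; exact ⟨le_of_eq hw, hVAnn⟩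
    by_cases hxb : x = cellN e.2.2 n
    · rw [if_pos hxb] at hp
      rcases List.mem_append.mp hp with hp' | hp'
      · rw [hg1 _ hbN] at hp'
        by_cases hba : cellN e.2.2 n = cellN e.2.1 n
        · rw [if_pos hba] at hp'
          rcases List.mem_append.mp hp' with hp'' | hp''
          · exact hWV _ haN p hp''
          · exact hnew1 (List.mem_singleton.mp hp'')
        · rw [if_neg hba] at hp'
          exact hWV _ hbN p hp'
      · exact hnew2 (List.mem_singleton.mp hp')
    · rw [if_neg hxb, hg1 x hx] at hp
      by_cases hxa : x = cellN e.2.1 n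
      · rw [if_pos hxa] at hp
        rcases List.mem_append.mp hp with hp' | hp'
        · exact hWV _ haN p hp'
        · exact hnew1 (List.mem_singleton.mp hp')
      · rw [if_neg hxa] at hp
        exact hWV x hx p hp
  · -- dp still carries the strictly-smaller-weight maxima
    intro x hx
    rw [hg2 x hx]
    have hnl : ¬ e.1 < cur := by omega
    by_cases hxb : x = cellN e.2.2 n
    · rw [if_pos hxb]
      subst hxb
      rw [queryB_append_not_lt _ _ _ _ hnl, hg1 _ hbN]
      by_cases hba : cellN e.2.2 n = cellN e.2.1 n
      · rw [if_pos hba, queryB_append_not_lt _ _ _ _ hnl, hba]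
        exact h2 _ haN
      · rw [if_neg hba]
        exact h2 _ hbN
    · rw [if_neg hxb, hg1 x hx]
      by_cases hxa : x = cellN e.2.1 n
      · rw [if_pos hxa, queryB_append_not_lt _ _ _ _ hnl, hxa]
        exact h2 _ haN
      · rw [if_neg hxa]
        exact h2 x hx
  · -- cells without a dict key are untouched
    intro x hx hnone
    have hna : cellN e.2.1 n ≠ x := by
      apply hnone
      rw [hu2]
      exact (PySem.Dict.mem_keys_insert _ _ _ _).mpr (Or.inl rfl)
    have hnb : cellN e.2.2 n ≠ x := by
      apply hnone
      rw [hu2]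
      exact (PySem.Dict.mem_keys_insert _ _ _ _).mpr
        (Or.inr ((PySem.Dict.mem_keys_insert _ _ _ _).mpr (Or.inl rfl)))
    rw [hg2 x hx, if_neg (fun hh => hnb hh.symm), hg1 x hx, if_neg (fun hh => hna hh.symm)]
    apply hU0 x hx
    intro k hk
    apply hnone
    rw [hu2]
    exact (PySem.Dict.mem_keys_insert _ _ _ _).mpr
      (Or.inr ((PySem.Dict.mem_keys_insert _ _ _ _).mpr (Or.inr hk)))
  · -- every dict entry is the full-log maximum of its label's cell
    intro p hp
    rw [hu2] at hp
    rcases (PySem.Dict.mem_items_insert _ _ _ _).mp hp with rfl | ⟨hp', hpa⟩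
    · -- p = (e.2.1, V2)
      simp only
      rw [hg2 _ haN]
      by_cases hab : e.2.1 = e.2.2
      · rw [if_pos (by rw [hab]), hg1 _ hbN, if_pos (by rw [hab])]
        rw [nodeBest_append _ _ _ hVBnn, nodeBest_append _ _ _ hVAnn, hVAval, hVBval]
        rw [PySem.Dict.getD_insert]
        rw [if_pos hab, ← hab]
        rw [dict_lookup P n dp cur u hist hG hIc e.2.1 hPa]
      · have hcab : cellN e.2.1 n ≠ cellN e.2.2 n := fun hc => hab (hG.2 _ _ hPa hPb hc)
        rw [if_neg hcab, hg1 _ haN, if_pos rfl]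
        rw [nodeBest_append _ _ _ hVAnn, hVAval]
        rw [PySem.Dict.getD_insert, if_neg hab]
        rw [dict_lookup P n dp cur u hist hG hIc e.2.1 hPa]
    · rcases (PySem.Dict.mem_items_insert _ _ _ _).mp hp' with rfl | ⟨hp'', hpb⟩
      · -- p = (e.2.2, V1), with label e.2.2 ≠ e.2.1
        simp only at hpa ⊢
        have hcab : cellN e.2.2 n ≠ cellN e.2.1 n := fun hc => hpa (hG.2 _ _ hPb hPa hc)
        rw [hg2 _ hbN, if_pos rfl, hg1 _ hbN, if_neg hcab]
        rw [nodeBest_append _ _ _ hVBnn, hVBval]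
        rw [dict_lookup P n dp cur u hist hG hIc e.2.2 hPb]
      · -- an old entry: its cell is neither endpoint's cell
        have hPp : P p.1 := hPk p.1 (PySem.Dict.mem_keys_of_mem_items u hp'')
        have hcpa : cellN p.1 n ≠ cellN e.2.1 n := fun hc => hpa (hG.2 _ _ hPp hPa hc)
        have hcpb : cellN p.1 n ≠ cellN e.2.2 n := fun hc => hpb (hG.2 _ _ hPp hPb hc)
        have hcp : cellN p.1 n < n := cellN_lt _ _ hn
        rw [hg2 _ hcp, if_neg hcpb, hg1 _ hcp, if_neg hcpa]
        exact hUk p hp''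

-- crossing a weight boundary: A first flushes, then proceeds as if freshly entered
theorem stepA_flush (dp : List Int) (cur : Int) (u : PySem.Dict Int Int)
    (e : Int × Int × Int) (hne : e.1 ≠ cur) :
    stepA (dp, cur, u) e = stepA (flushA u dp, e.1, PySem.Dict.empty) e := by
  simp [stepA, if_pos hne]

-- main loop correspondence
theorem loop_corr (P : Int → Prop) (R : List (Int × Int × Int)) :
    ∀ (n : Nat) (dp : List Int) (cur : Int) (u : PySem.Dict Int Int)
      (hist : List (List (Int × Int))),
    GoodP P n →
    InvAB P n dp cur u hist →
    R.Pairwise (fun e f => e.1 ≤ f.1) →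
    (∀ e ∈ R, cur ≤ e.1 ∧ P e.2.1 ∧ P e.2.2) →
    flushA (R.foldl stepA (dp, cur, u)).2.2 (R.foldl stepA (dp, cur, u)).1
      = (R.foldl stepB hist).map nodeBest := by
  induction R with
  | nil =>
    intro n dp cur u hist hG hI _ _
    have hget := flushA_nodeBest P n dp cur u hist hG hI
    obtain ⟨hdl, hhl, hnd, hPk, hWV, h2, hU0, hUk⟩ := hI
    simp only [List.foldl_nil]
    apply List.ext_getElem (by rw [length_flushA, hdl, List.length_map, hhl])
    intro i h1 h2'
    have hi : i < n := by rw [length_flushA, hdl] at h1; exact h1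
    rw [← List.getD_eq_getElem _ 0 h1, List.getElem_map,
      ← List.getD_eq_getElem _ ([] : List (Int × Int)) (by rw [hhl]; exact hi)]
    exact hget i hi
  | cons e R' ih =>
    intro n dp cur u hist hG hI hPW hmem
    obtain ⟨hcur, hPea, hPeb⟩ := hmem e List.mem_cons_self
    by_cases hce : e.1 = cur
    · obtain ⟨hst, hinv⟩ := inv_step P n dp cur u hist e hG hI hce hPea hPeb
      simp only [List.foldl_cons]
      rw [hst]
      exact ih n dp cur _ _ hG hinv (List.pairwise_cons.mp hPW).2
        (fun f hf => hmem f (List.mem_cons_of_mem _ hf))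
    · have hlt : cur < e.1 := lt_of_le_of_ne hcur (fun h => hce h.symm)
      have hIf := inv_flush P n dp cur u hist e.1 hG hI hlt
      obtain ⟨hst, hinv⟩ := inv_step P n (flushA u dp) e.1 PySem.Dict.empty hist e hG hIf rfl hPea hPeb
      simp only [List.foldl_cons]
      rw [stepA_flush dp cur u e hce, hst]
      apply ih n _ e.1 _ _ hG hinv (List.pairwise_cons.mp hPW).2
      intro f hf
      exact ⟨(List.pairwise_cons.mp hPW).1 f hf, (hmem f (List.mem_cons_of_mem _ hf)).2⟩

-- encKey order determines weight order inside Dom's bounds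
theorem encKey_mono (e f : Int × Int × Int)
    (he : -2147483648 ≤ e.1 ∧ e.1 ≤ 2147483648 ∧ -2147483648 ≤ e.2.1 ∧ e.2.1 ≤ 2147483648 ∧
          -2147483648 ≤ e.2.2 ∧ e.2.2 ≤ 2147483648)
    (hf : -2147483648 ≤ f.1 ∧ f.1 ≤ 2147483648 ∧ -2147483648 ≤ f.2.1 ∧ f.2.1 ≤ 2147483648 ∧
          -2147483648 ≤ f.2.2 ∧ f.2.2 ≤ 2147483648)
    (h : encKey e ≤ encKey f) : e.1 ≤ f.1 := by
  unfold encKey at h; omega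

-- ===== VERDICT (by name: the statement is the Claim_ definition above) =====
theorem solution_spec : Claim_equal_solution := by
  intro N A B C hDom hPre
  unfold Spec_solution
  by_cases hA : A = []
  · subst hA
    simp [solution, solution_alt]
  · rcases hPre with hA' | ⟨hzne, hbnd, hinj⟩
    · exact absurd hA' hA
    obtain ⟨e0, he0⟩ := List.exists_mem_of_ne_nil _ hzne
    have hN : 0 < N := by
      have := (hbnd e0 he0).1
      omega
    have hNn : ((N.toNat : Nat) : Int) = N := Int.toNat_of_nonneg (le_of_lt hN)
    have hz0 : 0 < (C.zip (A.zip B)).length := List.length_pos_of_ne_nil hzne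
    have hm : ¬ min (min (PySem.List.len A) (PySem.List.len B)) (PySem.List.len C) = 0 := by
      rw [List.length_zip, List.length_zip] at hz0
      simp only [PySem.List.len_eq]
      omega
    -- the admissible label set: the endpoints occurring in the edge list
    set P : Int → Prop := fun k => k ∈ (C.zip (A.zip B)).flatMap (fun e => [e.2.1, e.2.2]) with hP
    have hPends : ∀ e ∈ C.zip (A.zip B), P e.2.1 ∧ P e.2.2 := by
      intro e he
      constructor
      · exact List.mem_flatMap.mpr ⟨e, he, by simp⟩
      · exact List.mem_flatMap.mpr ⟨e, he, by simp⟩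
    have hPbnd : ∀ k, P k → -N ≤ k ∧ k < N := by
      intro k hk
      obtain ⟨e, he, hke⟩ := List.mem_flatMap.mp hk
      have := hbnd e he
      rcases List.mem_cons.mp hke with rfl | hke'
      · exact this.1
      · rw [List.mem_singleton.mp hke']
        exact this.2
    have hG : GoodP P N.toNat := by
      constructor
      · intro k hk
        have := hPbnd k hk
        omega
      · intro k l hk hl hc
        by_contra hne
        apply hinj k hk l hl hne
        unfold cellN at hc
        have hkb := hPbnd k hk
        have hlb := hPbnd l hl
        have hk0 : 0 ≤ k % N := Int.emod_nonneg k (by omega)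
        have hl0 : 0 ≤ l % N := Int.emod_nonneg l (by omega)
        rw [show ((N.toNat : Nat) : Int) = N from Int.toNat_of_nonneg (by omega)] at hc
        omega
    -- membership facts about the sorted edge list
    have hSmem : ∀ f ∈ sortEdges C A B, f ∈ C.zip (A.zip B) := by
      intro f hf
      exact (PySem.List.mem_sorted _ _ _ f).mp hf
    -- Dom bounds make encKey order-reflecting in the weight
    have hDomBnd : ∀ f ∈ sortEdges C A B,
        -2147483648 ≤ f.1 ∧ f.1 ≤ 2147483648 ∧ -2147483648 ≤ f.2.1 ∧ f.2.1 ≤ 2147483648 ∧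
          -2147483648 ≤ f.2.2 ∧ f.2.2 ≤ 2147483648 := by
      intro f hf
      have hfz := hSmem f hf
      have h1 : f.1 ∈ C := (List.of_mem_zip hfz).1
      have h2 : f.2 ∈ A.zip B := (List.of_mem_zip hfz).2
      have h2a : f.2.1 ∈ A := (List.of_mem_zip h2).1
      have h2b : f.2.2 ∈ B := (List.of_mem_zip h2).2
      unfold Dom_solution at hDom
      simp only [Bool.and_eq_true, List.all_eq_true, pvDomInt, decide_eq_true_eq] at hDom
      obtain ⟨⟨⟨_, hDA⟩, hDB⟩, hDC⟩ := hDom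
      exact ⟨(hDC _ h1).1, (hDC _ h1).2, (hDA _ h2a).1, (hDA _ h2a).2, (hDB _ h2b).1, (hDB _ h2b).2⟩
    have hPW : (sortEdges C A B).Pairwise (fun e f => e.1 ≤ f.1) := by
      refine (PySem.List.sorted_pairwise _ encKey).imp_of_mem ?_
      intro f g hf hg hfg
      exact encKey_mono f g (hDomBnd f hf) (hDomBnd g hg) hfg
    have hSne : sortEdges C A B ≠ [] := by
      intro h
      exact hzne ((PySem.List.sorted_eq_nil_iff _ _ _).mp h)
    have hmem : ∀ f ∈ sortEdges C A B,
        ((sortEdges C A B).headD (0, 0, 0)).1 ≤ f.1 ∧ P f.2.1 ∧ P f.2.2 := by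
      cases hS : sortEdges C A B with
      | nil => exact absurd hS hSne
      | cons s t =>
        intro f hf
        refine ⟨?_, hPends f ((hS ▸ hSmem) f hf)⟩
        rw [List.headD_cons]
        rcases List.mem_cons.mp hf with rfl | hf'
        · exact le_refl _
        · exact ((List.pairwise_cons.mp (hS ▸ hPW)).1 f hf')
    have hInv0 : InvAB P N.toNat (List.replicate N.toNat 0)
        ((sortEdges C A B).headD (0, 0, 0)).1 PySem.Dict.empty (List.replicate N.toNat []) := by
      refine ⟨List.length_replicate, List.length_replicate, PySem.Dict.nodup_keys_empty,
        by simp [PySem.Dict.keys_empty], ?_, ?_, ?_, ?_⟩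
      · intro x hx p hp
        rw [List.getD_eq_getElem _ _ (by simpa using hx), List.getElem_replicate] at hp
        cases hp
      · intro x hx
        rw [List.getD_eq_getElem _ _ (by simpa using hx), List.getElem_replicate,
          List.getD_eq_getElem _ _ (by simpa using hx), List.getElem_replicate]
        rfl
      · intro x hx _
        rw [List.getD_eq_getElem _ _ (by simpa using hx), List.getElem_replicate,
          List.getD_eq_getElem _ _ (by simpa using hx), List.getElem_replicate]
        rfl
      · intro p hp
        simp [PySem.Dict.empty] at hp
    have key := loop_corr P (sortEdges C A B) N.toNat (List.replicate N.toNat 0)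
      ((sortEdges C A B).headD (0, 0, 0)).1 PySem.Dict.empty (List.replicate N.toNat [])
      hG hInv0 hPW hmem
    simp only [solution, solution_alt, if_neg hA, if_neg hm]
    rw [key]
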